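-- pv_equiv track=rewrite | github.com/arrowandbow12/PiE2 | main.py | largeSortList
-- ===== SOURCE A (Python) =====
-- def largeSortList(str):
--     possibleList = []
--     element1 = -1
--     while element1 < len(str) - 1:
--         element1 += 1
--         element2 = element1
--         while element2 < len(str):
--             element2 += 1
--             if isGood(str[element1 : element2]):
--                 possibleList = insertSort(possibleList, str[element1 : element2])
--     return possibleList
--
-- def isGood(str):
--     for i in range(3, len(str)):
--         if(str[i] == str[i-1] and str[i-1] == str[i-2] and str[i-2] == str[i-3]):
--             return False
--     return True
--
-- def insertSort(list, str):
--     if len(list) == 0: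
--         list.append(str)
--         return list
--     for i in range(len(list)):
--         if len(str) >= len(list[i]):
--             list.insert(i, str)
--             break
--     return list
-- ===== SOURCE B (Python) =====
-- def largeSortList(str):
--     # Simpler/faster: emit good substrings directly in the final order
--     # (length descending, then start descending); no insertion sort at all.
--     n = len(str)
--     out = []
--     for L in range(n, 0, -1):
--         for start in range(n - L, -1, -1):
--             sub = str[start:start + L]
--             if _good(sub):
--                 out.append(sub)
--     return out
--
-- def _good(s):
--     return not any(s[i] == s[i + 1] == s[i + 2] == s[i + 3]
--                    for i in range(len(s) - 3))
-- ===== Notes on version B (the rewrite author's own statement) =====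
-- stated objective: faster
-- what changed: A generates every substring in start-ascending order and places each good one with a quadratic insertion-sort scan of the accumulated list; B emits the good substrings directly in the final output order (length descending, then start descending) with a plain append, eliminating the insertion sort entirely.
import Mathlib
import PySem

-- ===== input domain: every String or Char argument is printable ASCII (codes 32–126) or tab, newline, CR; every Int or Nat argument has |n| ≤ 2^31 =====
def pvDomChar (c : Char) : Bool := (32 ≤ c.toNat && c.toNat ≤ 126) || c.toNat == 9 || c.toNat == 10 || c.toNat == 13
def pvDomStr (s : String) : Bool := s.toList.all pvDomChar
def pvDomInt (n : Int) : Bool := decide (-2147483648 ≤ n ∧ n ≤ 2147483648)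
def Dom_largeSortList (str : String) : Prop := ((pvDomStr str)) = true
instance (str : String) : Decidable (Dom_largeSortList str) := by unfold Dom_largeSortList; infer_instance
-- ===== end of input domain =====

-- B replaces A's generate-and-insertion-sort with direct emission of the good
-- substrings in the final order (length descending, then start descending): simpler and faster.

-- ===== PORT A =====
-- isGood: for i in range(3, len(str)): if str[i]==str[i-1] and str[i-1]==str[i-2] and str[i-2]==str[i-3]: return False; return True
def isGoodA (s : String) : Bool :=
  !((PySem.List.pyRange 3 (PySem.Str.len s) 1).any (fun i =>
      (PySem.Str.pyGet? s i == PySem.Str.pyGet? s (i - 1)) &&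
      (PySem.Str.pyGet? s (i - 1) == PySem.Str.pyGet? s (i - 2)) &&
      (PySem.Str.pyGet? s (i - 2) == PySem.Str.pyGet? s (i - 3))))

-- the 'for i in range(len(list)): if len(str) >= len(list[i]): list.insert(i, str); break' scan
def insLoopA : List String → String → List String
  | [], _ => []
  | t :: rest, s =>
      if PySem.Str.len s ≥ PySem.Str.len t then s :: t :: rest
      else t :: insLoopA rest s

def insertSortA (l : List String) (s : String) : List String :=
  if l.length == 0 then l ++ [s] else insLoopA l s

-- inner 'while element2 < len(str)' loop
def lslInner (str : String) (e1 e2 : Int) (acc : List String) : List String :=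
  if e2 < PySem.Str.len str then
    let e2' := e2 + 1
    let sub := PySem.Str.slice str (some e1) (some e2')
    lslInner str e1 e2' (if isGoodA sub then insertSortA acc sub else acc)
  else acc
termination_by (PySem.Str.len str - e2).toNat
decreasing_by simp only [PySem.Str.len_eq] at *; omega

-- outer 'while element1 < len(str) - 1' loop
def lslOuter (str : String) (e1 : Int) (acc : List String) : List String :=
  if e1 < PySem.Str.len str - 1 then
    let e1' := e1 + 1
    lslOuter str e1' (lslInner str e1' e1' acc)
  else acc
termination_by (PySem.Str.len str - 1 - e1).toNat
decreasing_by simp only [PySem.Str.len_eq] at *; omega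

def largeSortList (str : String) : List String := lslOuter str (-1) []

-- ===== PORT B =====
-- not any(s[i]==s[i+1]==s[i+2]==s[i+3] for i in range(len(s)-3))
def goodB (s : String) : Bool :=
  !((PySem.List.pyRange 0 (PySem.Str.len s - 3) 1).any (fun i =>
      (PySem.Str.pyGet? s i == PySem.Str.pyGet? s (i + 1)) &&
      (PySem.Str.pyGet? s (i + 1) == PySem.Str.pyGet? s (i + 2)) &&
      (PySem.Str.pyGet? s (i + 2) == PySem.Str.pyGet? s (i + 3))))

-- for L in range(n, 0, -1): for start in range(n-L, -1, -1): if _good(sub): out.append(sub)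
def largeSortList_alt (str : String) : List String :=
  let n := PySem.Str.len str
  (PySem.List.pyRange n 0 (-1)).foldl (fun out L =>
    (PySem.List.pyRange (n - L) (-1) (-1)).foldl (fun out start =>
      let sub := PySem.Str.slice str (some start) (some (start + L))
      if goodB sub then out ++ [sub] else out) out) []

-- ===== PRECONDITION & SPEC =====
def Spec_largeSortList (str : String) (out : List String) : Prop := out = largeSortList_alt str
instance (str : String) (out : List String) : Decidable (Spec_largeSortList str out) := by unfold Spec_largeSortList; infer_instance

-- ===== CLAIM (what is proved, stated in full; the proofs are below) =====
def Claim_equal_largeSortList : Prop := ∀ (str : String), Dom_largeSortList str → Spec_largeSortList str (largeSortList str)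

-- ===== LEMMAS AND PROOFS =====

-- the substring str[a : a+L]
def subS (str : String) (a L : Nat) : String :=
  PySem.Str.slice str (some (a : Int)) (some ((a : Int) + (L : Int)))

def goodN (str : String) (a L : Nat) : Bool := goodB (subS str a L)

-- the good substrings of length L with start < k, starts descending
def groupS (str : String) (L k : Nat) : List String :=
  (((List.range k).filter (fun a => goodN str a L)).reverse).map (fun a => subS str a L)

-- concat of groups for lengths L = t down to 1
def canonFrom (str : String) (f : Nat → Nat) : Nat → List String
  | 0 => []
  | t + 1 => groupS str (t + 1) (f (t + 1)) ++ canonFrom str f t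

-- canonFrom with one extra string s placed at the head of the group of length Ls
def canonFromIns (str : String) (f : Nat → Nat) (Ls : Nat) (s : String) : Nat → List String
  | 0 => []
  | t + 1 => (if t + 1 = Ls then s :: groupS str (t + 1) (f (t + 1)) else groupS str (t + 1) (f (t + 1)))
      ++ canonFromIns str f Ls s t

lemma toList_subS (str : String) (a L : Nat) :
    (subS str a L).toList = (str.toList.drop a).take L := by
  simp [subS, PySem.Str.toList_slice, PySem.Chars.slice_eq_listSlice, PySem.List.slice_natCast_add]

lemma len_subS (str : String) (a L : Nat) (h : a + L ≤ str.toList.length) :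
    PySem.Str.len (subS str a L) = (L : Int) := by
  rw [PySem.Str.len_eq, toList_subS]
  simp only [List.length_take, List.length_drop]
  omega

lemma goodB_of_short (s : String) (h : s.toList.length ≤ 3) : goodB s = true := by
  have h3 : PySem.Str.len s - 3 ≤ 0 := by rw [PySem.Str.len_eq]; omega
  rw [goodB, PySem.List.pyRange_one_eq_nil h3]
  rfl

lemma goodN_one (str : String) (a : Nat) : goodN str a 1 = true := by
  apply goodB_of_short
  rw [toList_subS]
  simp only [List.length_take, List.length_drop]
  omega

lemma beq_chain_symm (a b c d : Option Char) :
    (((d == c) && (c == b)) && (b == a)) = (((a == b) && (b == c)) && (c == d)) := by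
  rw [Bool.beq_comm (a := d) (b := c), Bool.beq_comm (a := c) (b := b), Bool.beq_comm (a := b) (b := a)]
  ac_rfl

lemma isGoodA_eq_goodB (s : String) : isGoodA s = goodB s := by
  unfold isGoodA goodB
  rw [PySem.List.pyRange_one, PySem.List.pyRange_one, List.any_map, List.any_map]
  have h0 : (PySem.Str.len s - 3 - 0).toNat = (PySem.Str.len s - 3).toNat := by norm_num
  rw [h0]
  congr 1
  apply List.any_congr rfl
  intro k
  simp only [Function.comp_apply]
  have e1 : 3 + (k : Int) - 1 = (k : Int) + 2 := by ring
  have e2 : 3 + (k : Int) - 2 = (k : Int) + 1 := by ring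
  have e3 : 3 + (k : Int) - 3 = (k : Int) := by ring
  have e4 : 3 + (k : Int) = (k : Int) + 3 := by ring
  have e5 : 0 + (k : Int) = (k : Int) := by ring
  rw [e1, e2, e3, e4, e5]
  exact beq_chain_symm _ _ _ _

lemma insLoopA_cons_ge (t : String) (l : List String) (s : String)
    (h : PySem.Str.len t ≤ PySem.Str.len s) : insLoopA (t :: l) s = s :: t :: l := by
  rw [insLoopA, if_pos (show PySem.Str.len s ≥ PySem.Str.len t from h)]

lemma insLoopA_append_gt (X l : List String) (s : String)
    (hX : ∀ x ∈ X, PySem.Str.len s < PySem.Str.len x) :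
    insLoopA (X ++ l) s = X ++ insLoopA l s := by
  induction X with
  | nil => simp
  | cons x X ih =>
      have hx := hX x (by simp)
      rw [List.cons_append, insLoopA,
        if_neg (show ¬ PySem.Str.len s ≥ PySem.Str.len x by omega),
        ih (fun y hy => hX y (by simp [hy]))]
      simp

lemma groupS_succ (str : String) (L k : Nat) :
    groupS str L (k + 1) =
      (if goodN str k L then [subS str k L] else []) ++ groupS str L k := by
  simp only [groupS, List.range_succ, List.filter_append]
  split_ifs with h <;> simp [h]

lemma groupS_zero (str : String) (L : Nat) : groupS str L 0 = [] := by
  simp [groupS]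

lemma mem_groupS (str : String) (L k : Nat) (x : String) (hx : x ∈ groupS str L k) :
    ∃ a, a < k ∧ x = subS str a L := by
  simp only [groupS, List.mem_map, List.mem_reverse, List.mem_filter, List.mem_range] at hx
  obtain ⟨a, ⟨ha, _⟩, rfl⟩ := hx
  exact ⟨a, ha, rfl⟩

lemma mem_canonFrom (str : String) (f : Nat → Nat) (t : Nat) (x : String)
    (hx : x ∈ canonFrom str f t) : ∃ a L, 1 ≤ L ∧ L ≤ t ∧ a < f L ∧ x = subS str a L := by
  induction t with
  | zero => simp [canonFrom] at hx
  | succ t ih =>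
      simp only [canonFrom, List.mem_append] at hx
      rcases hx with hx | hx
      · obtain ⟨a, ha, rfl⟩ := mem_groupS str (t + 1) (f (t + 1)) x hx
        exact ⟨a, t + 1, by omega, by omega, ha, rfl⟩
      · obtain ⟨a, L, h1, h2, h3, h4⟩ := ih hx
        exact ⟨a, L, h1, by omega, h3, h4⟩

lemma groupS_one_ne_nil (str : String) (k : Nat) (h : 1 ≤ k) : groupS str 1 k ≠ [] := by
  simp only [groupS, ne_eq, List.map_eq_nil_iff, List.reverse_eq_nil_iff]
  intro hc
  have : (0 : Nat) ∈ List.filter (fun a => goodN str a 1) (List.range k) := by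
    simp [List.mem_range, goodN_one]
    omega
  simp [hc] at this

lemma canonFrom_ne_nil (str : String) (f : Nat → Nat) (t : Nat)
    (hg1 : 1 ≤ f 1) (ht : 1 ≤ t) : canonFrom str f t ≠ [] := by
  induction t with
  | zero => omega
  | succ t ih =>
      rcases Nat.eq_zero_or_pos t with h0 | h1
      · subst h0
        simp only [canonFrom, List.append_nil]
        exact groupS_one_ne_nil str (f 1) hg1
      · simp only [canonFrom, ne_eq, List.append_eq_nil_iff, not_and]
        intro _ hc
        exact ih h1 hc

lemma canonFrom_congr (str : String) (f g : Nat → Nat) (t : Nat)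
    (h : ∀ L, 1 ≤ L → L ≤ t → groupS str L (f L) = groupS str L (g L)) :
    canonFrom str f t = canonFrom str g t := by
  induction t with
  | zero => rfl
  | succ t ih =>
      simp only [canonFrom]
      rw [h (t + 1) (by omega) (by omega), ih (fun L h1 h2 => h L h1 (by omega))]

lemma canonFrom_nil (str : String) (f : Nat → Nat) (t : Nat)
    (h : ∀ L, f L = 0) : canonFrom str f t = [] := by
  induction t with
  | zero => rfl
  | succ t ih => simp [canonFrom, h, groupS_zero, ih]

lemma canonFromIns_of_lt (str : String) (f : Nat → Nat) (Ls : Nat) (s : String) (t : Nat)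
    (h : t < Ls) : canonFromIns str f Ls s t = canonFrom str f t := by
  induction t with
  | zero => rfl
  | succ t ih =>
      simp only [canonFromIns, canonFrom, if_neg (show ¬ t + 1 = Ls by omega)]
      rw [ih (by omega)]

lemma insLoopA_canonFrom (str : String) (f : Nat → Nat) (s : String) (Ls : Nat)
    (hlen : PySem.Str.len s = (Ls : Int)) (h1 : 1 ≤ Ls)
    (hflen : ∀ L, 1 ≤ L → L ≤ str.toList.length → f L + L ≤ str.toList.length + 1)
    (hg1 : 1 ≤ f 1) :
    ∀ t, Ls ≤ t → t ≤ str.toList.length →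
      insLoopA (canonFrom str f t) s = canonFromIns str f Ls s t := by
  intro t
  induction t with
  | zero => omega
  | succ t ih =>
      intro hLs htn
      have hlenG : ∀ x ∈ groupS str (t + 1) (f (t + 1)), PySem.Str.len x = ((t : Int) + 1) := by
        intro x hx
        obtain ⟨a, ha, rfl⟩ := mem_groupS str (t + 1) (f (t + 1)) x hx
        have h5 := hflen (t + 1) (by omega) (by omega)
        rw [len_subS str a (t + 1) (by omega)]
        push_cast; ring
      rcases Nat.lt_or_ge t Ls with hcase | hcase
      · -- Ls = t + 1 : insert at the very front
        have hLe : Ls = t + 1 := by omega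
        simp only [canonFrom, canonFromIns, if_pos hLe.symm,
          canonFromIns_of_lt str f Ls s t (by omega)]
        cases hG : groupS str (t + 1) (f (t + 1)) with
        | cons g gs =>
            have hg := hlenG g (by simp [hG])
            rw [List.cons_append,
              insLoopA_cons_ge g _ s (by rw [hg, hlen, hLe]; omega)]
            simp
        | nil =>
            simp only [List.nil_append, List.cons_append]
            have ht1 : 1 ≤ t := by
              by_contra hc
              have ht0 : t = 0 := by omega
              subst ht0
              exact groupS_one_ne_nil str (f 1) hg1 hG
            obtain ⟨y, ys, hys⟩ :=
              List.exists_cons_of_ne_nil (canonFrom_ne_nil str f t hg1 ht1)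
            have hy : y ∈ canonFrom str f t := by rw [hys]; simp
            obtain ⟨a, L, hL1, hL2, ha, hyv⟩ := mem_canonFrom str f t y hy
            have h5 := hflen L hL1 (by omega)
            have hylen : PySem.Str.len y = (L : Int) := by
              rw [hyv]; exact len_subS str a L (by omega)
            rw [hys, insLoopA_cons_ge y ys s (by rw [hylen, hlen]; omega)]
      · -- Ls ≤ t : step over the whole group of length t + 1
        simp only [canonFrom, canonFromIns,
          if_neg (show ¬ t + 1 = Ls by omega)]
        rw [insLoopA_append_gt _ _ s
            (fun x hx => by rw [hlenG x hx, hlen]; omega),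
          ih hcase (by omega)]

lemma canonFromIns_eq (str : String) (f f' : Nat → Nat) (Ls : Nat) (s : String) (t : Nat)
    (hgood : groupS str Ls (f' Ls) = s :: groupS str Ls (f Ls))
    (hother : ∀ L, 1 ≤ L → L ≤ t → L ≠ Ls → groupS str L (f' L) = groupS str L (f L)) :
    canonFromIns str f Ls s t = canonFrom str f' t := by
  induction t with
  | zero => rfl
  | succ t ih =>
      simp only [canonFromIns, canonFrom]
      rw [ih (fun L h1 h2 h3 => hother L h1 (by omega) h3)]
      congr 1
      split_ifs with h
      · rw [← h] at hgood; rw [hgood, h]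
      · exact (hother (t + 1) (by omega) (by omega) h).symm

lemma insertSortA_canonFrom (str : String) (f : Nat → Nat) (s : String) (Ls t : Nat)
    (hlen : PySem.Str.len s = (Ls : Int)) (h1 : 1 ≤ Ls) (h2 : Ls ≤ t)
    (ht : t ≤ str.toList.length)
    (hflen : ∀ L, 1 ≤ L → L ≤ str.toList.length → f L + L ≤ str.toList.length + 1)
    (hg1 : 1 ≤ f 1) :
    insertSortA (canonFrom str f t) s = canonFromIns str f Ls s t := by
  have hne := canonFrom_ne_nil str f t hg1 (by omega)
  unfold insertSortA
  rw [if_neg (by simpa using hne)]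
  exact insLoopA_canonFrom str f s Ls hlen h1 hflen hg1 t h2 ht

-- the group-count functions of the two loop invariants
def fmid (str : String) (k m : Nat) : Nat → Nat :=
  fun L => if L ≤ m - k then k + 1 else min k (str.toList.length - L + 1)

def ffull (str : String) (k : Nat) : Nat → Nat :=
  fun L => min k (str.toList.length - L + 1)

lemma canonFrom_singleton (str : String) (f : Nat → Nat)
    (hf1 : f 1 = 1) (hf : ∀ L, 2 ≤ L → f L = 0) :
    ∀ t, 1 ≤ t → canonFrom str f t = [subS str 0 1] := by
  intro t
  induction t with
  | zero => omega
  | succ t ih =>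
      intro _
      rcases Nat.eq_zero_or_pos t with h0 | h1
      · subst h0
        simp [canonFrom, groupS, hf1, goodN_one]
      · simp only [canonFrom]
        rw [hf (t + 1) (by omega), groupS_zero, List.nil_append]
        exact ih h1

lemma inner_loop (str : String) (k : Nat) (hk : k < str.toList.length) :
    ∀ d m, k ≤ m → m ≤ str.toList.length → str.toList.length - m = d →
    lslInner str (k : Int) (m : Int) (canonFrom str (fmid str k m) str.toList.length) =
      canonFrom str (fmid str k str.toList.length) str.toList.length := by
  intro d
  induction d with
  | zero =>
      intro m h1 h2 h3
      have hm : m = str.toList.length := by omega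
      subst hm
      rw [lslInner, if_neg (by simp only [PySem.Str.len_eq]; omega)]
  | succ d ih =>
      intro m h1 h2 h3
      have hm : m < str.toList.length := by omega
      rw [lslInner, if_pos (by simp only [PySem.Str.len_eq]; exact_mod_cast hm)]
      have hcast : ((m : Int) + 1) = ((m + 1 : Nat) : Int) := by push_cast; ring
      simp only [hcast, isGoodA_eq_goodB]
      have hsub : PySem.Str.slice str (some (k : Int)) (some ((m + 1 : Nat) : Int)) =
          subS str k (m + 1 - k) := by
        unfold subS
        congr 2
        omega
      rw [hsub]
      have hih := ih (m + 1) (by omega) (by omega) (by omega)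
      by_cases hdeg : k = 0 ∧ m = 0
      · -- very first iteration: the accumulator is empty
        obtain ⟨hk0, hm0⟩ := hdeg
        subst hk0; subst hm0
        have hacc : canonFrom str (fmid str 0 0) str.toList.length = [] := by
          rw [canonFrom_congr str _ (fun _ => 0) _
              (fun L hL1 hL2 => by unfold fmid; rw [if_neg (by omega)]; norm_num),
            canonFrom_nil str _ _ (fun _ => rfl)]
        rw [hacc]
        have hg : goodN str 0 1 = true := goodN_one str 0
        simp only [goodN] at hg
        rw [hg, if_pos rfl]
        have hone : insertSortA [] (subS str 0 1) = [subS str 0 1] := rfl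
        rw [hone]
        have hsing := canonFrom_singleton str (fmid str 0 (0 + 1))
            (by unfold fmid; rw [if_pos (by omega)])
            (fun L hL => by unfold fmid; rw [if_neg (by omega)]; norm_num)
            str.toList.length (by omega)
        rw [hsing] at hih
        exact hih
      · -- the accumulator already contains the length-1 substring starting at 0
        have hkm : k ≠ 0 ∨ m ≠ 0 := by tauto
        have hg1 : 1 ≤ fmid str k m 1 := by
          rcases hkm with h' | h' <;> (unfold fmid; split_ifs <;> omega)
        have hflen : ∀ L, 1 ≤ L → L ≤ str.toList.length →
            fmid str k m L + L ≤ str.toList.length + 1 := by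
          intro L hL hLn
          unfold fmid; split_ifs <;> omega
        set Ls := m + 1 - k with hLs
        have hLs1 : 1 ≤ Ls := by omega
        cases hgood : goodN str k Ls with
        | true =>
            simp only [goodN] at hgood
            rw [hgood, if_pos rfl]
            have hfmid1 : fmid str k (m + 1) Ls = k + 1 := by
              unfold fmid; rw [if_pos (by omega)]
            have hfmid0 : fmid str k m Ls = k := by
              unfold fmid; rw [if_neg (by omega)]; omega
            rw [insertSortA_canonFrom str (fmid str k m) (subS str k Ls) Ls
                str.toList.length
                (len_subS str k Ls (by omega)) hLs1 (by omega) le_rfl hflen hg1]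
            rw [canonFromIns_eq str (fmid str k m) (fmid str k (m + 1)) Ls
                (subS str k Ls) str.toList.length
                (by rw [hfmid1, hfmid0, groupS_succ]
                    have : goodN str k Ls = true := by simp only [goodN]; exact hgood
                    rw [this]; rfl)
                (fun L hL1 hL2 hL3 => by
                  have : fmid str k (m + 1) L = fmid str k m L := by
                    unfold fmid; split_ifs <;> omega
                  rw [this])]
            exact hih
        | false =>
            simp only [goodN] at hgood
            rw [hgood, if_neg (by simp)]
            rw [canonFrom_congr str (fmid str k m) (fmid str k (m + 1))
                str.toList.length
                (fun L hL1 hL2 => by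
                  by_cases hLL : L = Ls
                  · rw [hLL]
                    have e1 : fmid str k (m + 1) Ls = k + 1 := by
                      unfold fmid; rw [if_pos (by omega)]
                    have e0 : fmid str k m Ls = k := by
                      unfold fmid; rw [if_neg (by omega)]; omega
                    rw [e1, e0, groupS_succ,
                      show goodN str k Ls = false from hgood]
                    rfl
                  · have : fmid str k (m + 1) L = fmid str k m L := by
                      unfold fmid; split_ifs <;> omega
                    rw [this])]
            exact hih

lemma outer_loop (str : String) :
    ∀ d k, k ≤ str.toList.length → str.toList.length - k = d →
    lslOuter str ((k : Int) - 1) (canonFrom str (ffull str k) str.toList.length) =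
      canonFrom str (ffull str str.toList.length) str.toList.length := by
  intro d
  induction d with
  | zero =>
      intro k h1 h2
      have hkn : k = str.toList.length := by omega
      subst hkn
      rw [lslOuter, if_neg (by simp only [PySem.Str.len_eq]; omega)]
  | succ d ih =>
      intro k h1 h2
      have hk : k < str.toList.length := by omega
      rw [lslOuter, if_pos (by simp only [PySem.Str.len_eq]; omega)]
      rw [show (k : Int) - 1 + 1 = (k : Int) by ring]
      rw [canonFrom_congr str (ffull str k) (fmid str k k) str.toList.length
          (fun L hL1 hL2 => by
            have : fmid str k k L = ffull str k L := by
              unfold fmid ffull; rw [if_neg (by omega)]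
            rw [this])]
      show lslOuter str ((k : Int))
          (lslInner str ((k : Int)) ((k : Int)) (canonFrom str (fmid str k k) str.toList.length)) =
        canonFrom str (ffull str str.toList.length) str.toList.length
      rw [inner_loop str k hk (str.toList.length - k) k le_rfl (by omega) rfl]
      rw [canonFrom_congr str (fmid str k str.toList.length) (ffull str (k + 1))
          str.toList.length
          (fun L hL1 hL2 => by
            have : fmid str k str.toList.length L = ffull str (k + 1) L := by
              unfold fmid ffull; split_ifs <;> omega
            rw [this])]
      rw [show (k : Int) = ((k + 1 : Nat) : Int) - 1 by push_cast; ring]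
      exact ih (k + 1) (by omega) (by omega)

lemma A_eq_canon (str : String) :
    largeSortList str = canonFrom str (ffull str str.toList.length) str.toList.length := by
  unfold largeSortList
  have h0 : canonFrom str (ffull str 0) str.toList.length = [] := by
    rw [canonFrom_congr str _ (fun _ => 0) _
        (fun L hL1 hL2 => by unfold ffull; norm_num),
      canonFrom_nil str _ _ (fun _ => rfl)]
  rw [show (-1 : Int) = ((0 : Nat) : Int) - 1 by norm_num, ← h0]
  exact outer_loop str str.toList.length 0 (by omega) (by omega)

lemma inner_B (str : String) (L : Nat) (hLn : L ≤ str.toList.length) (out : List String) :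
    (PySem.List.pyRange ((str.toList.length : Int) - (L : Int)) (-1) (-1)).foldl
      (fun out start =>
        if goodB (PySem.Str.slice str (some start) (some (start + (L : Int)))) then
          out ++ [PySem.Str.slice str (some start) (some (start + (L : Int)))] else out) out
    = out ++ groupS str L (str.toList.length - L + 1) := by
  rw [show (str.toList.length : Int) - (L : Int) = ((str.toList.length - L : Nat) : Int) by omega]
  rw [PySem.List.pyRange_neg_one_eq_reverse]
  rw [show (-1 : Int) + 1 = 0 by ring,
    show ((str.toList.length - L : Nat) : Int) + 1 = ((str.toList.length - L + 1 : Nat) : Int) by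
      push_cast; ring]
  rw [PySem.List.pyRange_zero_natCast, ← List.map_reverse, List.foldl_map]
  rw [PySem.List.foldl_append_if
      (fun a : Nat => goodB (PySem.Str.slice str (some (a : Int)) (some ((a : Int) + (L : Int)))))
      (fun a : Nat => PySem.Str.slice str (some (a : Int)) (some ((a : Int) + (L : Int))))]
  congr 1
  rw [List.filter_reverse]
  rfl

lemma outer_B (str : String) :
    ∀ t, t ≤ str.toList.length → ∀ init : List String,
    (PySem.List.pyRange (t : Int) 0 (-1)).foldl
      (fun out L =>
        (PySem.List.pyRange ((str.toList.length : Int) - L) (-1) (-1)).foldl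
          (fun out start =>
            if goodB (PySem.Str.slice str (some start) (some (start + L))) then
              out ++ [PySem.Str.slice str (some start) (some (start + L))] else out) out) init
    = init ++ canonFrom str (fun L => str.toList.length - L + 1) t := by
  intro t
  induction t with
  | zero =>
      intro _ init
      rw [PySem.List.pyRange_neg_one_eq_nil (by norm_num)]
      simp [canonFrom]
  | succ t ih =>
      intro ht init
      rw [PySem.List.pyRange_neg_one_cons (by positivity)]
      simp only [List.foldl_cons]
      rw [inner_B str (t + 1) ht init]
      rw [show ((t + 1 : Nat) : Int) - 1 = (t : Int) by push_cast; ring]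
      rw [ih (by omega)]
      simp [canonFrom]

lemma B_eq_canon (str : String) :
    largeSortList_alt str = canonFrom str (ffull str str.toList.length) str.toList.length := by
  unfold largeSortList_alt
  simp only [PySem.Str.len_eq]
  rw [outer_B str str.toList.length le_rfl []]
  rw [List.nil_append]
  exact (canonFrom_congr str _ _ _
    (fun L hL1 hL2 => by
      have : ffull str str.toList.length L = str.toList.length - L + 1 := by
        unfold ffull; omega
      rw [this])).symm

-- ===== VERDICT (by name: the statement is the Claim_ definition above) =====
theorem largeSortList_spec : Claim_equal_largeSortList := by
  intro str _
  unfold Spec_largeSortList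
  rw [A_eq_canon, B_eq_canon]
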